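-- pv_equiv track=rewrite | github.com/ScottThurlow/nitrateonline | tools/convert_reviews.py | build_credits_html
-- ===== SOURCE A (Python) =====
-- def build_credits_html(credits):
--     """Build the film-credits <dl> HTML."""
--     if not credits:
--         return ""
--
--     # Preferred order
--     order = [
--         "Directed by", "Written by", "Screenplay by", "Based on",
--         "Starring", "Produced by", "Cinematography by", "Music by", "Edited by"
--     ]
--
--     lines = []
--     seen = set()
--
--     for label in order:
--         if label in credits and label not in seen:
--             seen.add(label)
--             val = credits[label]
--             lines.append(f'            <div class="film-credit">')
--             lines.append(f'              <dt class="credit-label">{label}</dt>')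
--             lines.append(f'              <dd class="credit-value">{val}</dd>')
--             lines.append(f'            </div>')
--
--     # Add any remaining credits not in the preferred order
--     for label, val in credits.items():
--         if label not in seen:
--             lines.append(f'            <div class="film-credit">')
--             lines.append(f'              <dt class="credit-label">{label}</dt>')
--             lines.append(f'              <dd class="credit-value">{val}</dd>')
--             lines.append(f'            </div>')
--
--     return "\n".join(lines)
-- ===== SOURCE B (Python) =====
-- def build_credits_html(credits):
--     """Build the film-credits <dl> HTML."""
--     order = [
--         "Directed by", "Written by", "Screenplay by", "Based on",
--         "Starring", "Produced by", "Cinematography by", "Music by", "Edited by"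
--     ]
--     # Bucket (counting) sort by preferred rank: one distribution pass over the
--     # credits, then flatten the buckets in rank order (rank len(order) = leftovers).
--     rank = {label: i for i, label in enumerate(order)}
--     buckets = {i: [] for i in range(len(order) + 1)}
--     for label, val in credits.items():
--         buckets[rank.get(label, len(order))].append((label, val))
--     lines = []
--     for i in range(len(order) + 1):
--         for label, val in buckets[i]:
--             lines += ['            <div class="film-credit">',
--                       f'              <dt class="credit-label">{label}</dt>',
--                       f'              <dd class="credit-value">{val}</dd>',
--                       '            </div>']
--     return "\n".join(lines)
-- ===== Notes on version B (the rewrite author's own statement) =====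
-- stated objective: alternative
-- what changed: B is a bucket (counting) sort by preferred-label rank: it builds a rank table, distributes each credit into rank buckets in a single pass over the dict, and flattens the buckets in rank order, instead of A's staged scans of the order list (with membership tests and a seen set) followed by a leftover scan of the dict.
import Mathlib
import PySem

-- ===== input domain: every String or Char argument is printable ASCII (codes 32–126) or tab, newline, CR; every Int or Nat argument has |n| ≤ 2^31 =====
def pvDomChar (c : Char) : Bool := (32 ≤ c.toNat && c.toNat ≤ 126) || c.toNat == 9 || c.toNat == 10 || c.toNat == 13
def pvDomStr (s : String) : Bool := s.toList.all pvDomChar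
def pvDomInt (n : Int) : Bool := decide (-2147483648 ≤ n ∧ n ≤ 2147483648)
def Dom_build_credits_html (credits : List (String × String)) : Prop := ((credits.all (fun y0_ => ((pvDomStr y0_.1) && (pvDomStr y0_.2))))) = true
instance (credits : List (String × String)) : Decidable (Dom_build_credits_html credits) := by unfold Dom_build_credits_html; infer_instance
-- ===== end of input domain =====

-- B replaces A's staged scans (preferred-order list with a seen set, then the dict's
-- leftovers) by a bucket sort on the preferred-label rank: one distribution pass over
-- the credits, then a flatten of the buckets in rank order; objective: alternative.

-- ===== PORT A =====
-- the preferred-order literal of A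
def pvOrder : List String :=
  ["Directed by", "Written by", "Screenplay by", "Based on",
   "Starring", "Produced by", "Cinematography by", "Music by", "Edited by"]

-- the four appended lines of one credit block (identical text in both Pythons)
def pvBlock (label val : String) : List String :=
  ["            <div class=\"film-credit\">",
   "              <dt class=\"credit-label\">" ++ label ++ "</dt>",
   "              <dd class=\"credit-value\">" ++ val ++ "</dd>",
   "            </div>"]

-- credits[label] (dict lookup; only evaluated under the `label in credits` guard)
def pvLookup (credits : List (String × String)) (label : String) : String :=
  ((credits.find? (fun p => p.1 == label)).map Prod.snd).getD ""

def build_credits_html (credits : List (String × String)) : String :=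
  if credits.isEmpty then ""
  else
    let order := pvOrder
    -- first loop: lines/seen accumulated together
    let st := order.foldl (fun (st : List String × PySem.Set String) label =>
      if credits.any (fun p => p.1 == label) && !(PySem.Set.contains st.2 label) then
        (st.1 ++ pvBlock label (pvLookup credits label), PySem.Set.add st.2 label)
      else st) ([], PySem.Set.empty)
    -- second loop: remaining credits not in seen
    let lines := credits.foldl (fun lines p =>
      if !(PySem.Set.contains st.2 p.1) then lines ++ pvBlock p.1 p.2 else lines) st.1
    PySem.Str.join "\n" lines

-- ===== PORT B =====
-- rank = {label: i for i, label in enumerate(order)}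
def pvRank : PySem.Dict String Int :=
  (PySem.List.enumerate pvOrder).foldl (fun d p => d.insert p.2 p.1) PySem.Dict.empty

def build_credits_html_alt (credits : List (String × String)) : String :=
  let rank := pvRank
  let n : Int := (pvOrder.length : Int)
  -- buckets = {i: [] for i in range(len(order) + 1)}
  let init : PySem.Dict Int (List (String × String)) :=
    (PySem.List.pyRange 0 (n + 1) 1).foldl (fun d i => d.insert i ([] : List (String × String))) PySem.Dict.empty
  -- distribution pass: buckets[rank.get(label, len(order))].append((label, val))
  let buckets := credits.foldl (fun d p => d.modify (rank.getD p.1 n) [] (· ++ [p])) init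
  -- flatten: for i in range(len(order)+1): for (label, val) in buckets[i]: lines += block
  -- (buckets[i] ported as getD i [], exact here: every key 0..len(order) is initialised)
  let lines := (PySem.List.pyRange 0 (n + 1) 1).foldl (fun lines i =>
      (buckets.getD i []).foldl (fun lines p => lines ++ pvBlock p.1 p.2) lines) ([] : List String)
  PySem.Str.join "\n" lines

-- ===== PRECONDITION & SPEC =====
-- Pre_ excludes association lists with duplicate keys: A's argument is a Python
-- dict, whose keys are unique, so such lists encode no input A is ever given.
def Pre_build_credits_html (credits : List (String × String)) : Prop :=
  (credits.map Prod.fst).Nodup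
instance (credits : List (String × String)) : Decidable (Pre_build_credits_html credits) := by unfold Pre_build_credits_html; infer_instance

def pvWitness_build_credits_html : (List (String × String)) :=
  [("Starring", "Jane Doe"), ("Color by", "Lab")]

def Spec_build_credits_html (credits : List (String × String)) (out : String) : Prop := out = build_credits_html_alt credits
instance (credits : List (String × String)) (out : String) : Decidable (Spec_build_credits_html credits out) := by unfold Spec_build_credits_html; infer_instance

-- ===== CLAIM (what is proved, stated in full; the proofs are below) =====
def Claim_equal_build_credits_html : Prop := ∀ (credits : List (String × String)), Dom_build_credits_html credits → Pre_build_credits_html credits → Spec_build_credits_html credits (build_credits_html credits)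

-- ===== LEMMAS AND PROOFS =====

-- A's first loop: over a Nodup label list disjoint from `seen`, it appends the block
-- of every present label and records exactly the present labels in `seen`.
theorem pv_loop1 (credits : List (String × String)) :
    ∀ (order : List String), order.Nodup →
    ∀ (lines : List String) (seen : PySem.Set String), (∀ l ∈ order, l ∉ seen) →
    order.foldl (fun (st : List String × PySem.Set String) label =>
      if credits.any (fun p => p.1 == label) && !(PySem.Set.contains st.2 label) then
        (st.1 ++ pvBlock label (pvLookup credits label), PySem.Set.add st.2 label)
      else st) (lines, seen)
    = (lines ++ (order.filter (fun label => credits.any (fun p => p.1 == label))).flatMap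
         (fun label => pvBlock label (pvLookup credits label)),
       seen ++ order.filter (fun label => credits.any (fun p => p.1 == label))) := by
  intro order
  induction order with
  | nil => intro _ lines seen _; simp
  | cons l rest ih =>
    intro hnd lines seen hdisj
    have hlns : l ∉ seen := hdisj l (by simp)
    have hrest : ∀ x ∈ rest, x ∉ seen := fun x hx => hdisj x (by simp [hx])
    have hlr : l ∉ rest := (List.nodup_cons.mp hnd).1
    simp only [List.foldl_cons]
    by_cases hp : credits.any (fun p => p.1 == l) = true
    · rw [if_pos (by simp [hp, hlns])]
      rw [PySem.Set.add_of_not_mem hlns]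
      rw [ih (List.nodup_cons.mp hnd).2 _ _ (by
        intro x hx
        simp only [List.mem_append, List.mem_singleton]
        rintro (h | rfl)
        · exact hrest x hx h
        · exact hlr hx)]
      simp [hp]
    · rw [if_neg (by simp [hp])]
      rw [ih (List.nodup_cons.mp hnd).2 _ _ hrest]
      simp [hp]

-- A's second loop: appends the block of every credit whose label is not in `seen`
theorem pv_loop2 (seen : List String) :
    ∀ (cs : List (String × String)) (lines : List String),
    cs.foldl (fun lines p =>
        if !(PySem.Set.contains seen p.1) then lines ++ pvBlock p.1 p.2 else lines) lines
    = lines ++ (cs.filter (fun p => !(PySem.Set.contains seen p.1))).flatMap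
        (fun p => pvBlock p.1 p.2) := by
  intro cs
  induction cs with
  | nil => intro lines; simp
  | cons c cs ih =>
    intro lines
    simp only [List.foldl_cons, List.filter_cons]
    by_cases h : (!(PySem.Set.contains seen c.1)) = true
    · rw [if_pos h, if_pos h, ih]
      simp [List.append_assoc]
    · rw [if_neg h, if_neg h, ih]

-- the rank lookup of B, spelled out label by label
theorem pv_rankD (l : String) :
    pvRank.getD l 9 =
      if l = "Directed by" then 0 else if l = "Written by" then 1
      else if l = "Screenplay by" then 2 else if l = "Based on" then 3
      else if l = "Starring" then 4 else if l = "Produced by" then 5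
      else if l = "Cinematography by" then 6 else if l = "Music by" then 7
      else if l = "Edited by" then 8 else 9 := by
  simp only [pvRank, pvOrder, PySem.List.enumerate_cons, PySem.List.enumerate_nil,
    List.foldl_cons, List.foldl_nil, PySem.Dict.getD_insert, PySem.Dict.getD_empty]
  norm_num
  split_ifs <;> simp_all

-- B's initial bucket dict maps everything to []
theorem pv_init_getD (c : Int) :
    (((PySem.List.pyRange 0 10 1).foldl
        (fun d i => d.insert i ([] : List (String × String))) PySem.Dict.empty).getD c []) = [] := by
  have hr : PySem.List.pyRange 0 10 1 = [0,1,2,3,4,5,6,7,8,9] := by decide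
  rw [hr]
  simp only [List.foldl_cons, List.foldl_nil, PySem.Dict.getD_insert, PySem.Dict.getD_empty]
  split_ifs <;> rfl

-- the c-th bucket after B's distribution pass: the credits of rank c, in order
theorem pv_bucket (credits : List (String × String)) (c : Int) :
    ((credits.foldl (fun d p => d.modify (pvRank.getD p.1 9) [] (· ++ [p]))
        ((PySem.List.pyRange 0 10 1).foldl
          (fun d i => d.insert i ([] : List (String × String))) PySem.Dict.empty)).getD c [])
    = credits.filter (fun p => pvRank.getD p.1 9 == c) := by
  have hm : credits.foldl (fun d p => d.modify (pvRank.getD p.1 9) [] (· ++ [p]))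
        ((PySem.List.pyRange 0 10 1).foldl
          (fun d i => d.insert i ([] : List (String × String))) PySem.Dict.empty)
      = (credits.map (fun p => (pvRank.getD p.1 9, p))).foldl
          (fun d q => d.modify q.1 [] (· ++ [q.2]))
          ((PySem.List.pyRange 0 10 1).foldl
            (fun d i => d.insert i ([] : List (String × String))) PySem.Dict.empty) := by
    rw [List.foldl_map]
  rw [hm, PySem.Dict.getD_foldl_modify_append, pv_init_getD]
  simp only [List.filter_map, List.map_map]
  simp [Function.comp_def]

-- under Nodup keys, the group of a label is its found pair (or nothing)
theorem pv_group_find (credits : List (String × String))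
    (h : (credits.map Prod.fst).Nodup) (label : String) :
    credits.filter (fun p => p.1 == label) =
      if credits.any (fun p => p.1 == label) then [(label, pvLookup credits label)] else [] := by
  induction credits with
  | nil => simp
  | cons c cs ih =>
    obtain ⟨k, v⟩ := c
    simp only [List.map_cons, List.nodup_cons] at h
    by_cases hc : k = label
    · subst hc
      have hno : ∀ p ∈ cs, ¬(p.1 == k) = true := by
        intro p hp hb
        exact h.1 (by rw [← eq_of_beq hb]; exact List.mem_map_of_mem hp)
      have hfil : cs.filter (fun p => p.1 == k) = [] :=
        List.filter_eq_nil_iff.mpr hno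
      simp only [List.filter_cons, List.any_cons, beq_self_eq_true, Bool.true_or, if_pos,
        hfil, pvLookup, List.find?_cons_of_pos]
      simp
    · have hb : ((k, v).1 == label) = false := by simp [hc]
      simp only [List.filter_cons, List.any_cons, hb, Bool.false_or, if_neg, Bool.false_eq_true,
        not_false_iff]
      rw [ih h.2]
      have hl : pvLookup ((k, v) :: cs) label = pvLookup cs label := by
        simp [pvLookup, hc]
      rw [hl]

-- rendering a filtered list, as a guarded flatMap
theorem pv_flatMap_filter {α : Type} (l : List α) (p : α → Bool) (f : α → List String) :
    (l.filter p).flatMap f = l.flatMap (fun x => if p x then f x else []) := by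
  induction l with
  | nil => rfl
  | cons a l ih =>
    simp only [List.filter_cons, List.flatMap_cons]
    by_cases h : p a = true
    · rw [if_pos h, if_pos h, List.flatMap_cons, ih]
    · rw [if_neg h, if_neg h, ih]; simp

-- B's flatten loop over any index list is a flatMap over the buckets
theorem pv_flatten (d : PySem.Dict Int (List (String × String))) :
    ∀ (is : List Int) (acc : List String),
    is.foldl (fun lines i =>
        (d.getD i []).foldl (fun lines p => lines ++ pvBlock p.1 p.2) lines) acc
    = acc ++ is.flatMap (fun i => (d.getD i []).flatMap (fun p => pvBlock p.1 p.2)) := by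
  intro is
  induction is with
  | nil => intro acc; simp
  | cons i is ih =>
    intro acc
    simp only [List.foldl_cons, List.flatMap_cons]
    rw [PySem.List.foldl_append_eq_flatMap, ih, List.append_assoc]

-- B, in closed form: the ten rank groups rendered in order
theorem pv_alt_eq (credits : List (String × String)) :
    build_credits_html_alt credits =
      PySem.Str.join "\n" ((PySem.List.pyRange 0 10 1).flatMap (fun i =>
        (credits.filter (fun p => pvRank.getD p.1 9 == i)).flatMap
          (fun p => pvBlock p.1 p.2))) := by
  unfold build_credits_html_alt
  simp only [show ((pvOrder.length : Int)) = 9 from rfl, show (9 : Int) + 1 = 10 by decide]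
  rw [pv_flatten]
  simp only [List.nil_append, pv_bucket]

-- B's group list equals A's two parts (Nodup keys)
set_option maxHeartbeats 2000000 in
theorem pv_B_lines (credits : List (String × String))
    (h : (credits.map Prod.fst).Nodup) :
    (PySem.List.pyRange 0 10 1).flatMap (fun i =>
        (credits.filter (fun p => pvRank.getD p.1 9 == i)).flatMap (fun p => pvBlock p.1 p.2))
    = (pvOrder.filter (fun label => credits.any (fun p => p.1 == label))).flatMap
        (fun label => pvBlock label (pvLookup credits label))
      ++ (credits.filter (fun p => !(pvOrder.contains p.1))).flatMap
        (fun p => pvBlock p.1 p.2) := by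
  have hg : ∀ (i : Int) (label : String),
      (∀ l : String, (pvRank.getD l 9 == i) = (l == label)) →
      (credits.filter (fun p => pvRank.getD p.1 9 == i)).flatMap (fun p => pvBlock p.1 p.2)
      = if credits.any (fun p => p.1 == label) then pvBlock label (pvLookup credits label) else [] := by
    intro i label hs
    rw [List.filter_congr (fun p _ => hs p.1), pv_group_find credits h label]
    split_ifs <;> simp
  have h0 := hg 0 "Directed by" (by intro l; rw [pv_rankD]; split_ifs <;> simp_all)
  have h1 := hg 1 "Written by" (by intro l; rw [pv_rankD]; split_ifs <;> simp_all)
  have h2 := hg 2 "Screenplay by" (by intro l; rw [pv_rankD]; split_ifs <;> simp_all)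
  have h3 := hg 3 "Based on" (by intro l; rw [pv_rankD]; split_ifs <;> simp_all)
  have h4 := hg 4 "Starring" (by intro l; rw [pv_rankD]; split_ifs <;> simp_all)
  have h5 := hg 5 "Produced by" (by intro l; rw [pv_rankD]; split_ifs <;> simp_all)
  have h6 := hg 6 "Cinematography by" (by intro l; rw [pv_rankD]; split_ifs <;> simp_all)
  have h7 := hg 7 "Music by" (by intro l; rw [pv_rankD]; split_ifs <;> simp_all)
  have h8 := hg 8 "Edited by" (by intro l; rw [pv_rankD]; split_ifs <;> simp_all)
  have h9 : credits.filter (fun p => pvRank.getD p.1 9 == 9)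
      = credits.filter (fun p => !(pvOrder.contains p.1)) := by
    apply List.filter_congr
    intro p _
    rw [pv_rankD]
    split_ifs <;> simp_all [pvOrder]
  have hr : PySem.List.pyRange 0 10 1 = [0,1,2,3,4,5,6,7,8,9] := by decide
  rw [hr]
  simp only [List.flatMap_cons, List.flatMap_nil, h0, h1, h2, h3, h4, h5, h6, h7, h8, h9,
    List.append_nil]
  rw [pv_flatMap_filter pvOrder]
  simp [pvOrder, List.append_assoc]

-- ===== VERDICT (by name: the statement is the Claim_ definition above) =====
theorem build_credits_html_spec : Claim_equal_build_credits_html := by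
  intro credits _ hpre
  unfold Spec_build_credits_html
  rw [pv_alt_eq, pv_B_lines credits hpre]
  unfold build_credits_html
  by_cases hempty : credits.isEmpty
  · have : credits = [] := List.isEmpty_iff.mp hempty
    subst this
    simp [pvOrder, PySem.Str.join]
  · rw [if_neg hempty]
    dsimp only
    have hA1 := pv_loop1 credits pvOrder (by decide) [] PySem.Set.empty (by simp [PySem.Set.empty])
    simp only [hA1, List.nil_append]
    have hA2 := pv_loop2 (pvOrder.filter (fun label => credits.any fun p => p.1 == label)) credits
      (List.flatMap (fun label => pvBlock label (pvLookup credits label))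
        (pvOrder.filter (fun label => credits.any fun p => p.1 == label)))
    have hcond : credits.filter
        (fun p => !(PySem.Set.contains
          (pvOrder.filter (fun label => credits.any (fun q => q.1 == label))) p.1))
        = credits.filter (fun p => !(pvOrder.contains p.1)) := by
      apply List.filter_congr
      intro p hp
      have hpres : credits.any (fun q => q.1 == p.1) = true := by
        simp only [List.any_eq_true]
        exact ⟨p, hp, by simp⟩
      simp only [PySem.Set.contains_eq_listContains]
      by_cases ho : p.1 ∈ pvOrder
      · simp [List.mem_filter, ho, hpres]
      · simp [List.mem_filter, ho]
    refine congrArg (PySem.Str.join "\n") (hA2.trans ?_)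
    rw [hcond]
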